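-- pv_equiv track=rewrite | github.com/Leti-10/Repositorio-ADS | ED/prova2.py | mesmas_letras_for
-- ===== SOURCE A (Python) =====
-- def mesmas_letras_for(s1, s2):
--     letras1 = ""
--     letras2 = ""
--     for letra in s1:
--         if letra not in letras1:
--             letras1 += letra
--     for letra in s2:
--         if letra not in letras2:
--             letras2 += letra
--     return sorted(letras1) == sorted(letras2)
-- ===== SOURCE B (Python) =====
-- def mesmas_letras_for(s1, s2):
--     return all(c in s2 for c in s1) and all(c in s1 for c in s2)
-- ===== Notes on version B (the rewrite author's own statement) =====
-- stated objective: simpler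
-- what changed: Replaces the two dedup-string-building loops and the sort-then-compare with two direct bidirectional membership passes over the original strings (no intermediate distinct-letter buffer, no sorting).
import Mathlib
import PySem

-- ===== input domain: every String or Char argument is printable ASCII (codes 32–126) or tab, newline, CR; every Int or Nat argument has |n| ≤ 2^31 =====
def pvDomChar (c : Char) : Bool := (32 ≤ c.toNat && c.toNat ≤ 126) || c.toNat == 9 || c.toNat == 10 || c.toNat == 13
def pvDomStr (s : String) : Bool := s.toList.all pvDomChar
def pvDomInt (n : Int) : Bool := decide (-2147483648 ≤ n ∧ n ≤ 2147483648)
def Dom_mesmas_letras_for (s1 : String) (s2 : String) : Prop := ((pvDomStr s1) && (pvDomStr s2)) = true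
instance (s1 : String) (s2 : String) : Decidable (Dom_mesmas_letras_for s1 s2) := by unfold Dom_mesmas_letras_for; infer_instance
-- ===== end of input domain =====

-- B replaces A's dedup-building loops and sort/compare with two direct bidirectional membership passes (simpler decomposition).


-- ===== PORT A =====
-- the two for-loops building the dedup strings letras1/letras2 (as lists of chars)
def pvDedupLoop (s : List Char) : List Char :=
  s.foldl (fun acc letra => if acc.contains letra then acc else acc ++ [letra]) []

def mesmas_letras_for (s1 : String) (s2 : String) : Bool :=
  let letras1 := pvDedupLoop s1.toList
  let letras2 := pvDedupLoop s2.toList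
  PySem.List.sorted letras1 (fun x => x) false == PySem.List.sorted letras2 (fun x => x) false

-- ===== PORT B =====
def mesmas_letras_for_alt (s1 : String) (s2 : String) : Bool :=
  s1.toList.all (fun c => s2.toList.contains c) && s2.toList.all (fun c => s1.toList.contains c)

-- ===== PRECONDITION & SPEC =====
def Spec_mesmas_letras_for (s1 : String) (s2 : String) (out : Bool) : Prop := out = mesmas_letras_for_alt s1 s2
instance (s1 : String) (s2 : String) (out : Bool) : Decidable (Spec_mesmas_letras_for s1 s2 out) := by unfold Spec_mesmas_letras_for; infer_instance

-- ===== CLAIM (what is proved, stated in full; the proofs are below) =====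
def Claim_equal_mesmas_letras_for : Prop := ∀ (s1 : String) (s2 : String), Dom_mesmas_letras_for s1 s2 → Spec_mesmas_letras_for s1 s2 (mesmas_letras_for s1 s2)

-- ===== LEMMAS AND PROOFS =====

theorem pvDedupLoop_go (s acc : List Char) (c : Char) :
    c ∈ s.foldl (fun acc letra => if acc.contains letra then acc else acc ++ [letra]) acc ↔
      (c ∈ acc ∨ c ∈ s) := by
  induction s generalizing acc with
  | nil => simp
  | cons x t ih =>
    simp only [List.foldl_cons]
    by_cases h : acc.contains x
    · simp only [h, if_pos, ih]
      constructor
      · rintro (h1 | h2)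
        · exact Or.inl h1
        · exact Or.inr (List.mem_cons_of_mem _ h2)
      · rintro (h1 | h2)
        · exact Or.inl h1
        · rcases List.mem_cons.mp h2 with h3 | h3
          · subst h3; exact Or.inl (by simpa using h)
          · exact Or.inr h3
    · simp only [h, if_neg, Bool.false_eq_true, not_false_iff, ih, List.mem_append,
        List.mem_singleton, List.mem_cons]
      tauto

theorem pvDedupLoop_nodup_go (s acc : List Char) (hacc : acc.Nodup) :
    (s.foldl (fun acc letra => if acc.contains letra then acc else acc ++ [letra]) acc).Nodup := by
  induction s generalizing acc with
  | nil => simpa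
  | cons x t ih =>
    simp only [List.foldl_cons]
    by_cases h : acc.contains x
    · simp only [h, if_pos]; exact ih acc hacc
    · simp only [h, if_neg, Bool.false_eq_true, not_false_iff]
      apply ih
      refine List.Nodup.append hacc (List.nodup_singleton x) ?_
      intro a ha hb
      rcases List.mem_singleton.mp hb with rfl
      exact h (by simpa using ha)

theorem mem_pvDedupLoop (s : List Char) (c : Char) : c ∈ pvDedupLoop s ↔ c ∈ s := by
  unfold pvDedupLoop
  rw [pvDedupLoop_go]
  simp

theorem pvDedupLoop_nodup (s : List Char) : (pvDedupLoop s).Nodup :=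
  pvDedupLoop_nodup_go s [] List.nodup_nil

-- ===== VERDICT (by name: the statement is the Claim_ definition above) =====
theorem mesmas_letras_for_spec : Claim_equal_mesmas_letras_for := by
  intro s1 s2 _
  unfold Spec_mesmas_letras_for mesmas_letras_for mesmas_letras_for_alt
  rw [Bool.eq_iff_iff]
  simp only [beq_iff_eq, Bool.and_eq_true, List.all_eq_true, List.contains_eq_mem,
    decide_eq_true_eq, PySem.List.sorted_id_eq_sorted_id_iff_perm]
  rw [List.perm_ext_iff_of_nodup (pvDedupLoop_nodup _) (pvDedupLoop_nodup _)]
  constructor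
  · intro h
    constructor
    · intro c hc
      exact (mem_pvDedupLoop _ c).mp ((h c).mp ((mem_pvDedupLoop _ c).mpr hc))
    · intro c hc
      exact (mem_pvDedupLoop _ c).mp ((h c).mpr ((mem_pvDedupLoop _ c).mpr hc))
  · rintro ⟨h1, h2⟩ c
    rw [mem_pvDedupLoop, mem_pvDedupLoop]
    exact ⟨fun hc => h1 c hc, fun hc => h2 c hc⟩
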